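-- pv_equiv track=rewrite | github.com/NaldCapuno/HyperTweak | main.py | _split_shell_commands
-- ===== SOURCE A (Python) =====
-- def _split_shell_commands(text: str) -> list[str]:
--     s = text.replace("\r\n", "\n").replace("\r", "\n").strip()
--     if not s:
--         return []
--     parts: list[str] = []
--     buf: list[str] = []
--     quote: str | None = None
--     for ch in s:
--         if quote is not None:
--             buf.append(ch)
--             if ch == quote:
--                 quote = None
--             continue
--         if ch in ("'", '"'):
--             quote = ch
--             buf.append(ch)
--             continue
--         if ch == ";":
--             part = "".join(buf).strip()
--             if part:
--                 parts.append(part)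
--             buf = []
--             continue
--         if ch == "\n":
--             buf.append(" ")
--             continue
--         buf.append(ch)
--     tail = "".join(buf).strip()
--     if tail:
--         parts.append(tail)
--     return parts
-- ===== SOURCE B (Python) =====
-- def _split_shell_commands(text: str) -> list[str]:
--     s = text.replace("\r\n", "\n").replace("\r", "\n").strip()
--     parts: list[str] = []
--     buf = ""
--     i, n = 0, len(s)
--     while i < n:
--         ch = s[i]
--         if ch == "'" or ch == '"':
--             j = s.find(ch, i + 1)
--             if j == -1:
--                 buf += s[i:]
--                 i = n
--             else:
--                 buf += s[i:j + 1]
--                 i = j + 1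
--         elif ch == ";":
--             part = buf.strip()
--             if part:
--                 parts.append(part)
--             buf = ""
--             i += 1
--         elif ch == "\n":
--             buf += " "
--             i += 1
--         else:
--             j = i + 1
--             while j < n and s[j] not in "'\";\n":
--                 j += 1
--             buf += s[i:j]
--             i = j
--     tail = buf.strip()
--     if tail:
--         parts.append(tail)
--     return parts
-- ===== Notes on version B (the rewrite author's own statement) =====
-- stated objective: alternative
-- what changed: B replaces A's per-character state-machine scan (a quote flag updated on every char) with an index-jumping tokenizer that consumes whole tokens at a time: a quoted span located with str.find, a run of ordinary characters, or a single delimiter character.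
import Mathlib
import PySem

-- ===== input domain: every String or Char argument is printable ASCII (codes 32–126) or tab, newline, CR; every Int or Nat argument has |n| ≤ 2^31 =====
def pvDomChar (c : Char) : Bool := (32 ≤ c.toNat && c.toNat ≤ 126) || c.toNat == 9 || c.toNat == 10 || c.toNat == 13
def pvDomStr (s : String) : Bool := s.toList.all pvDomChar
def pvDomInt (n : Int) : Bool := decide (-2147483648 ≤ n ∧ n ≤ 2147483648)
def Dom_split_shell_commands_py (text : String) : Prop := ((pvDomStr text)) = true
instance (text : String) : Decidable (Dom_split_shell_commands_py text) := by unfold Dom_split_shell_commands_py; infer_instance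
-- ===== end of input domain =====

-- B replaces A's per-character quote-state scan by a tokenizer that consumes whole
-- quoted spans and runs of ordinary characters at once (objective: alternative).

-- ===== PORT A =====
-- normalization line shared verbatim by both Pythons:
-- text.replace("\r\n","\n").replace("\r","\n").strip()
def pvNorm (text : String) : String :=
  PySem.Str.strip (PySem.Str.replace (PySem.Str.replace text "\r\n" "\n") "\r" "\n")

-- one iteration of A's `for ch in s` loop; state = (parts, buf, quote)
def pvAStep (st : List String × List Char × Option Char) (ch : Char) :
    List String × List Char × Option Char :=
  match st with
  | (parts, buf, some q) => (parts, buf ++ [ch], if ch = q then none else some q)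
  | (parts, buf, none) =>
    if ch = '\'' ∨ ch = '"' then (parts, buf ++ [ch], some ch)
    else if ch = ';' then
      let part := PySem.Str.strip (String.mk buf)
      ((if part ≠ "" then parts ++ [part] else parts), [], none)
    else if ch = '\n' then (parts, buf ++ [' '], none)
    else (parts, buf ++ [ch], none)

-- A's trailing `tail = "".join(buf).strip(); if tail: parts.append(tail)`
def pvFin (st : List String × List Char × Option Char) : List String :=
  let tail := PySem.Str.strip (String.mk st.2.1)
  if tail ≠ "" then st.1 ++ [tail] else st.1

def split_shell_commands_py (text : String) : List String :=
  let s := pvNorm text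
  if s = "" then []
  else pvFin (s.toList.foldl pvAStep ([], [], none))

-- ===== PORT B =====
-- `s[j] not in "'\";\n"` of B's ordinary-run scan
def pvOrd (x : Char) : Bool := !(x == '\'' || x == '"' || x == ';' || x == '\n')

-- B's `while i < n` tokenizer: each step consumes one token of s[i:]
def pvBLoop (parts : List String) (buf : List Char) (cs : List Char) : List String :=
  match cs with
  | [] =>
    let tail := PySem.Str.strip (String.mk buf)
    if tail ≠ "" then parts ++ [tail] else parts
  | c :: rest =>
    if c = '\'' ∨ c = '"' then
      -- s.find(ch, i+1): split the remainder at the next matching quote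
      if rest.dropWhile (· != c) = [] then
        pvBLoop parts (buf ++ c :: rest.takeWhile (· != c)) []
      else
        pvBLoop parts (buf ++ c :: rest.takeWhile (· != c) ++ [c]) (rest.dropWhile (· != c)).tail
    else if c = ';' then
      let part := PySem.Str.strip (String.mk buf)
      pvBLoop (if part ≠ "" then parts ++ [part] else parts) [] rest
    else if c = '\n' then pvBLoop parts (buf ++ [' ']) rest
    else pvBLoop parts (buf ++ c :: rest.takeWhile pvOrd) (rest.dropWhile pvOrd)
termination_by cs.length
decreasing_by
  · simp
  · have h1 := List.length_dropWhile_le (p := (· != c)) (l := rest)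
    have h2 := List.length_tail (l := rest.dropWhile (· != c))
    simp at h2 ⊢; omega
  · simp
  · simp
  · have := List.length_dropWhile_le (p := pvOrd) (l := rest)
    simp; omega

def split_shell_commands_py_alt (text : String) : List String :=
  pvBLoop [] [] (pvNorm text).toList

-- ===== PRECONDITION & SPEC =====
def Spec_split_shell_commands_py (text : String) (out : List String) : Prop := out = split_shell_commands_py_alt text
instance (text : String) (out : List String) : Decidable (Spec_split_shell_commands_py text out) := by unfold Spec_split_shell_commands_py; infer_instance

-- ===== CLAIM (what is proved, stated in full; the proofs are below) =====
def Claim_equal_split_shell_commands_py : Prop := ∀ (text : String), Dom_split_shell_commands_py text → Spec_split_shell_commands_py text (split_shell_commands_py text)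

-- ===== LEMMAS AND PROOFS =====

-- A's loop with an open quote q copies chars verbatim up to and including the next q
lemma pvQuoteScan (q : Char) : ∀ (cs : List Char) (parts : List String) (buf : List Char),
    cs.foldl pvAStep (parts, buf, some q) =
      (if cs.dropWhile (· != q) = [] then (parts, buf ++ cs, some q)
       else ((cs.dropWhile (· != q)).tail).foldl pvAStep
              (parts, buf ++ cs.takeWhile (· != q) ++ [q], none)) := by
  intro cs
  induction cs with
  | nil => intro parts buf; simp
  | cons c cs ih =>
    intro parts buf
    by_cases hc : c = q
    · subst hc
      simp [List.foldl_cons, pvAStep, List.dropWhile, List.takeWhile]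
    · have hne : (c != q) = true := by simp [hc]
      simp only [List.foldl_cons, pvAStep, if_neg hc, List.dropWhile, List.takeWhile, hne]
      rw [ih parts (buf ++ [c])]
      by_cases h : cs.dropWhile (· != q) = [] <;> simp [h]

-- A's loop over a run of ordinary characters just appends them
lemma pvRunScan : ∀ (cs : List Char) (parts : List String) (buf : List Char),
    cs.foldl pvAStep (parts, buf, none) =
      (cs.dropWhile pvOrd).foldl pvAStep (parts, buf ++ cs.takeWhile pvOrd, none) := by
  intro cs
  induction cs with
  | nil => intro parts buf; simp
  | cons c cs ih =>
    intro parts buf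
    by_cases hp : pvOrd c = true
    · have h1 : ¬(c = '\'' ∨ c = '"') := by
        simp [pvOrd] at hp; rintro (rfl | rfl) <;> simp at hp
      have h2 : c ≠ ';' := by simp [pvOrd] at hp; exact fun h => by simp [h] at hp
      have h3 : c ≠ '\n' := by simp [pvOrd] at hp; exact fun h => by simp [h] at hp
      simp only [List.foldl_cons, pvAStep, if_neg h1, if_neg h2, if_neg h3,
        List.dropWhile, List.takeWhile, hp]
      rw [ih parts (buf ++ [c])]
      simp
    · have hp' : pvOrd c = false := by simpa using hp
      simp [List.dropWhile, List.takeWhile, hp']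

-- main invariant: B's tokenizer equals A's scan followed by the tail flush
lemma pvBLoop_eq : ∀ (n : Nat) (cs : List Char), cs.length ≤ n →
    ∀ (parts : List String) (buf : List Char),
      pvBLoop parts buf cs = pvFin (cs.foldl pvAStep (parts, buf, none)) := by
  intro n
  induction n with
  | zero =>
    intro cs hlen parts buf
    have : cs = [] := List.length_eq_zero_iff.mp (Nat.le_zero.mp hlen)
    subst this
    simp [pvBLoop, pvFin]
  | succ n ih =>
    intro cs hlen parts buf
    cases cs with
    | nil => simp [pvBLoop, pvFin]
    | cons c rest =>
      have hrest : rest.length ≤ n := by simpa using Nat.lt_succ_iff.mp (Nat.lt_of_lt_of_le (by simp) hlen)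
      by_cases hq : c = '\'' ∨ c = '"'
      · rw [pvBLoop]
        simp only [if_pos hq]
        have hfold : (c :: rest).foldl pvAStep (parts, buf, none)
            = rest.foldl pvAStep (parts, buf ++ [c], some c) := by
          simp [List.foldl_cons, pvAStep, if_pos hq]
        rw [hfold, pvQuoteScan]
        by_cases h : rest.dropWhile (· != c) = []
        · have htake : rest.takeWhile (· != c) = rest := by
            have := List.takeWhile_append_dropWhile (p := (· != c)) (l := rest)
            rw [h] at this; simpa using this
          rw [if_pos h, if_pos h, ih [] (by simp) parts (buf ++ c :: rest.takeWhile (· != c))]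
          simp [pvFin, htake]
        · have hrem : (rest.dropWhile (· != c)).tail.length ≤ n := by
            have h1 := List.length_dropWhile_le (p := (· != c)) (l := rest)
            have h2 := List.length_tail (l := rest.dropWhile (· != c))
            omega
          rw [if_neg h, if_neg h,
            ih (rest.dropWhile (· != c)).tail hrem parts (buf ++ c :: rest.takeWhile (· != c) ++ [c])]
          simp
      · by_cases hs : c = ';'
        · subst hs
          rw [pvBLoop]
          simp only [if_neg hq, if_pos rfl]
          have hfold : (';' :: rest).foldl pvAStep (parts, buf, none)
              = rest.foldl pvAStep
                  ((if PySem.Str.strip (String.mk buf) ≠ "" then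
                      parts ++ [PySem.Str.strip (String.mk buf)] else parts), [], none) := by
            simp [List.foldl_cons, pvAStep, if_neg hq]
          rw [hfold, ih rest hrest]; simp
        · by_cases hn2 : c = '\n'
          · subst hn2
            rw [pvBLoop]
            simp only [if_neg hq, if_neg (by decide : ¬('\n' = ';')), if_pos rfl]
            have hfold : ('\n' :: rest).foldl pvAStep (parts, buf, none)
                = rest.foldl pvAStep (parts, buf ++ [' '], none) := by
              simp [List.foldl_cons, pvAStep, if_neg hq]
            rw [hfold, ih rest hrest]; simp
          · have h1 : c ≠ '\'' := fun h => hq (Or.inl h)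
            have h2 : c ≠ '"' := fun h => hq (Or.inr h)
            have hp : pvOrd c = true := by simp [pvOrd, h1, h2, hs, hn2]
            rw [pvBLoop]
            simp only [if_neg hq, if_neg hs, if_neg hn2]
            have hfold : (c :: rest).foldl pvAStep (parts, buf, none)
                = rest.foldl pvAStep (parts, buf ++ [c], none) := by
              simp [List.foldl_cons, pvAStep, if_neg hq, if_neg hs, if_neg hn2]
            rw [hfold, pvRunScan]
            have hdrop : (rest.dropWhile pvOrd).length ≤ n :=
              le_trans (List.length_dropWhile_le _ _) hrest
            rw [ih (rest.dropWhile pvOrd) hdrop parts (buf ++ c :: rest.takeWhile pvOrd)]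
            simp

-- ===== VERDICT (by name: the statement is the Claim_ definition above) =====
theorem split_shell_commands_py_spec : Claim_equal_split_shell_commands_py := by
  intro text _
  unfold Spec_split_shell_commands_py split_shell_commands_py split_shell_commands_py_alt
  by_cases h : pvNorm text = ""
  · rw [h]
    simp [pvBLoop]
    decide
  · simp only [if_neg h]
    exact (pvBLoop_eq (pvNorm text).toList.length _ le_rfl [] []).symm
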